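-- pv_equiv track=rewrite | github.com/PROxZIMA/Competitive-Coding | Hackerrank/Contests/hack-the-interview-v-asia-pacific/the-xor-problem.py | maxXorValue
-- ===== SOURCE A (Python) =====
-- def maxXorValue(s, k):
--     y = ''
--     for i in s:
--         if k > 0:
--             if i == '1':
--                 y += '0'
--             else:
--                 y += '1'
--                 k -= 1
--         else:
--             break
--
--     return y.ljust(len(s), '0')
-- ===== SOURCE B (Python) =====
-- def maxXorValue(s, k):
--     # Phase 1: locate cutoff = position just after the k-th non-'1' char
--     # (0 if k <= 0, len(s) if fewer than k such chars).
--     if k <= 0: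
--         cutoff = 0
--     else:
--         cutoff = len(s)
--         seen = 0
--         for i, c in enumerate(s):
--             if c != '1':
--                 seen += 1
--                 if seen == k:
--                     cutoff = i + 1
--                     break
--     # Phase 2: flip the prefix, pad the rest with zeros.
--     return ''.join('0' if c == '1' else '1' for c in s[:cutoff]) + '0' * (len(s) - cutoff)
-- ===== Notes on version B (the rewrite author's own statement) =====
-- stated objective: simpler
-- what changed: Replaces the intertwined accumulate-and-break loop that mutates k and builds y char by char with a two-phase decomposition: first locate the cutoff index just after the k-th non-'1' character, then build the result as flipped-prefix plus zero-padding in one expression.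
import Mathlib
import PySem

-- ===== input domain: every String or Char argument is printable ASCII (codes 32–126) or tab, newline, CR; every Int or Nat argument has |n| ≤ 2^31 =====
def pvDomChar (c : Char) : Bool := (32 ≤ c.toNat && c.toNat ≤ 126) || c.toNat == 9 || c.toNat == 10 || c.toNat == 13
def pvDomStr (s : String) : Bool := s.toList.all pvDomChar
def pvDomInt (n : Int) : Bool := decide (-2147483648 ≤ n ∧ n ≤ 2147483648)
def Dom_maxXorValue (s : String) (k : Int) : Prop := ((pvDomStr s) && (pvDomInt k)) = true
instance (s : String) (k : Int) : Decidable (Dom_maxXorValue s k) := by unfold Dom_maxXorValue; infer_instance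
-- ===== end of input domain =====

-- B replaces A's intertwined accumulate-and-break loop by two phases: locate the cutoff
-- index, then flip the prefix and pad with zeros (objective: simpler decomposition).

-- ===== PORT A =====
-- the for-loop with break: build y while k > 0
def maxXorLoopA : List Char → Int → List Char
  | [], _ => []
  | c :: cs, k =>
    if k > 0 then
      if c = '1' then '0' :: maxXorLoopA cs k
      else '1' :: maxXorLoopA cs (k - 1)
    else []

def maxXorValue (s : String) (k : Int) : String :=
  let y := maxXorLoopA s.toList k
  -- y.ljust(len(s), '0'): pad on the right up to len(s) (no-op if already that long)
  String.mk (if y.length < s.toList.length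
             then y ++ List.replicate (s.toList.length - y.length) '0'
             else y)

-- ===== PORT B =====
-- phase 1: index just after the k-th non-'1' char (len if fewer); caller handles k ≤ 0
def maxXorCut : List Char → Int → Nat
  | [], _ => 0
  | c :: cs, k =>
    if c ≠ '1' then (if k = 1 then 1 else 1 + maxXorCut cs (k - 1))
    else 1 + maxXorCut cs k

def maxXorValue_alt (s : String) (k : Int) : String :=
  let cs := s.toList
  let cutoff := if k ≤ 0 then 0 else maxXorCut cs k
  String.mk (((cs.take cutoff).map (fun c => if c = '1' then '0' else '1'))
             ++ List.replicate (cs.length - cutoff) '0')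

-- ===== PRECONDITION & SPEC =====
def Spec_maxXorValue (s : String) (k : Int) (out : String) : Prop := out = maxXorValue_alt s k
instance (s : String) (k : Int) (out : String) : Decidable (Spec_maxXorValue s k out) := by unfold Spec_maxXorValue; infer_instance

-- ===== CLAIM (what is proved, stated in full; the proofs are below) =====
def Claim_equal_maxXorValue : Prop := ∀ (s : String) (k : Int), Dom_maxXorValue s k → Spec_maxXorValue s k (maxXorValue s k)

-- ===== LEMMAS AND PROOFS =====
theorem maxXorCut_le_length (cs : List Char) (k : Int) : maxXorCut cs k ≤ cs.length := by
  induction cs generalizing k with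
  | nil => simp [maxXorCut]
  | cons c cs ih =>
    simp only [maxXorCut, List.length_cons]
    have h1 := ih (k - 1)
    have h2 := ih k
    split_ifs <;> omega

theorem maxXorLoopA_nonpos (cs : List Char) (k : Int) (hk : k ≤ 0) : maxXorLoopA cs k = [] := by
  cases cs with
  | nil => rfl
  | cons c cs => simp [maxXorLoopA, show ¬ k > 0 by omega]

theorem maxXorLoopA_eq (cs : List Char) (k : Int) :
    maxXorLoopA cs k =
      (cs.take (if k ≤ 0 then 0 else maxXorCut cs k)).map (fun c => if c = '1' then '0' else '1') := by
  induction cs generalizing k with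
  | nil => simp [maxXorLoopA]
  | cons c cs ih =>
    by_cases hk : k ≤ 0
    · simp [maxXorLoopA, hk, show ¬ k > 0 by omega]
    · have hk' : k > 0 := by omega
      by_cases hc : c = '1'
      · simp [maxXorLoopA, maxXorCut, hk', hc, hk, ih k, Nat.add_comm 1]
      · by_cases h1 : k = 1
        · simp [maxXorLoopA, maxXorCut, hc, h1, maxXorLoopA_nonpos cs 0 le_rfl]
        · simp [maxXorLoopA, maxXorCut, hk', hc, hk, h1, ih (k - 1),
            show ¬ (k - 1 ≤ 0) by omega, Nat.add_comm 1]

-- ===== VERDICT (by name: the statement is the Claim_ definition above) =====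
theorem maxXorValue_spec : Claim_equal_maxXorValue := by
  intro s k _
  show maxXorValue s k = maxXorValue_alt s k
  unfold maxXorValue maxXorValue_alt
  set cs := s.toList with hcs
  set cut := if k ≤ 0 then 0 else maxXorCut cs k with hcut
  have hle : cut ≤ cs.length := by
    rw [hcut]; split_ifs with h
    · omega
    · exact maxXorCut_le_length cs k
  have hy : maxXorLoopA cs k = (cs.take cut).map (fun c => if c = '1' then '0' else '1') :=
    maxXorLoopA_eq cs k
  have hlen : ((cs.take cut).map (fun c => if c = '1' then '0' else '1')).length = cut := by
    rw [List.length_map, List.length_take]; omega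
  simp only [hy, hlen]
  by_cases h : cut < cs.length
  · rw [if_pos h]
  · have hEq : cut = cs.length := by omega
    rw [if_neg h, ← hcut, hEq, Nat.sub_self, List.replicate_zero, List.append_nil,
      List.take_length]
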